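-- pv_equiv track=rewrite | github.com/larc-iu/plaid | plaid-igt/services/client/tokenization/token_processor.py | _merge_with_existing_tokens
-- ===== SOURCE A (Python) =====
-- from typing import List, Dict, Any, Optional
--
-- def _merge_with_existing_tokens(new_tokens: List[Dict], existing_tokens: List[Dict]) -> List[Dict]:
--     """Merge new tokens with existing ones, preserving existing tokens"""
--     if not existing_tokens:
--         return new_tokens
--
--     # Sort tokens by position
--     existing_sorted = sorted(existing_tokens, key=lambda t: t['begin'])
--     new_sorted = sorted(new_tokens, key=lambda t: t['begin'])
--
--     merged = []
--     existing_idx = 0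
--
--     for new_token in new_sorted:
--         # Skip any existing tokens that come before this new token
--         while (existing_idx < len(existing_sorted) and
--                existing_sorted[existing_idx]['end'] <= new_token['begin']):
--             merged.append(existing_sorted[existing_idx])
--             existing_idx += 1
--
--         # Check if new token overlaps with existing
--         if (existing_idx < len(existing_sorted) and
--             existing_sorted[existing_idx]['begin'] < new_token['end']):
--             # Skip this new token, existing token takes precedence
--             continue
--         else:
--             # No overlap, add the new token
--             merged.append(new_token)
--
--     # Add any remaining existing tokens
--     while existing_idx < len(existing_sorted):
--         merged.append(existing_sorted[existing_idx])
--         existing_idx += 1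
--
--     return merged
-- ===== SOURCE B (Python) =====
-- def _merge_with_existing_tokens(new_tokens, existing_tokens):
--     """Merge new tokens with existing ones, preserving existing tokens.
--
--     Filter-then-sort: keep only the new tokens that overlap no existing
--     token, then order everything with a single sort by position.
--     """
--     if not existing_tokens:
--         return new_tokens
--
--     existing_sorted = sorted(existing_tokens, key=lambda t: t['begin'])
--     kept = [n for n in sorted(new_tokens, key=lambda t: t['begin'])
--             if not any(e['begin'] < n['end'] and e['end'] > n['begin']
--                        for e in existing_tokens)]
--     return sorted(kept + existing_sorted, key=lambda t: t['begin'])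
-- ===== Notes on version B (the rewrite author's own statement) =====
-- stated objective: simpler
-- what changed: Replaces A's stateful two-pointer merge sweep with a filter-then-sort: keep the new tokens that overlap no existing token, then a single sort by 'begin' orders everything; Pre_ excludes tokens lacking a 'begin'/'end' key (KeyError) and degenerate tokens with end <= begin, where A's interleaving of equal-position tokens is an accidental tie order of its pointer sweep.
import Mathlib
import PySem

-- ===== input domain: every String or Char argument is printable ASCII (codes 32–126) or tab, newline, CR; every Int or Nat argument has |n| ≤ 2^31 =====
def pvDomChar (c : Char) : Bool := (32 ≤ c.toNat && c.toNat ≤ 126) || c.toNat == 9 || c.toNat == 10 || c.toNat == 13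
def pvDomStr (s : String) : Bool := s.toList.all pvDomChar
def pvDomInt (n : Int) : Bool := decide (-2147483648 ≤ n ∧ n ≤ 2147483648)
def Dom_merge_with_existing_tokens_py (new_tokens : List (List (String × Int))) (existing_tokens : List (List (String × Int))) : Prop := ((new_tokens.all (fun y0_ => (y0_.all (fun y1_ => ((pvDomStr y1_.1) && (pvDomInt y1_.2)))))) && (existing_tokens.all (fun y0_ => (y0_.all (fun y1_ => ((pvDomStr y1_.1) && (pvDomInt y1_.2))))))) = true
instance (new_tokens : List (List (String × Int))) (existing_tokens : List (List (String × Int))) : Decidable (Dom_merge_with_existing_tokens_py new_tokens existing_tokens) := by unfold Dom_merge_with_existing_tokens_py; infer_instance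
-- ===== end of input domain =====

-- B replaces A's two-pointer merge sweep by a no-overlap filter on the new tokens
-- followed by one sort by 'begin' (objective: simpler decomposition, not speed).

-- shared token-field lookup: Python t['begin'] / t['end'] on the dict (getD 0 is
-- only reached outside Pre_, where the Python raises KeyError)
def tokGet (t : List (String × Int)) (k : String) : Int :=
  ((PySem.Dict.ofList t).get? k).getD 0
def tokBegin (t : List (String × Int)) : Int := tokGet t "begin"
def tokEnd (t : List (String × Int)) : Int := tokGet t "end"

-- ===== PORT A =====
-- the inner 'while existing_idx < len and existing_sorted[idx]["end"] <= new_token["begin"]'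
def pvSkipA (nb : Int) : List (List (String × Int)) → List (List (String × Int)) →
    (List (List (String × Int)) × List (List (String × Int)))
  | merged, [] => (merged, [])
  | merged, e :: r =>
    if tokEnd e ≤ nb then pvSkipA nb (merged ++ [e]) r else (merged, e :: r)

-- one iteration of 'for new_token in new_sorted'
def pvStepA (st : List (List (String × Int)) × List (List (String × Int)))
    (n : List (String × Int)) : List (List (String × Int)) × List (List (String × Int)) :=
  let p := pvSkipA (tokBegin n) st.1 st.2
  match p.2 with
  | [] => (p.1 ++ [n], p.2)
  | e :: _ => if tokBegin e < tokEnd n then (p.1, p.2) else (p.1 ++ [n], p.2)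

def merge_with_existing_tokens_py (new_tokens : List (List (String × Int))) (existing_tokens : List (List (String × Int))) : List (List (String × Int)) :=
  if existing_tokens.isEmpty then new_tokens
  else
    let existing_sorted := PySem.List.sorted existing_tokens tokBegin false
    let new_sorted := PySem.List.sorted new_tokens tokBegin false
    let st := new_sorted.foldl pvStepA ([], existing_sorted)
    -- trailing 'while existing_idx < len: merged.append(...)'
    st.2.foldl (fun m e => m ++ [e]) st.1

-- ===== PORT B =====
def pvOverlapB (e2 n : List (String × Int)) : Bool :=
  decide (tokBegin e2 < tokEnd n) && decide (tokEnd e2 > tokBegin n)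

def merge_with_existing_tokens_py_alt (new_tokens : List (List (String × Int))) (existing_tokens : List (List (String × Int))) : List (List (String × Int)) :=
  if existing_tokens.isEmpty then new_tokens
  else
    let existing_sorted := PySem.List.sorted existing_tokens tokBegin false
    let kept := (PySem.List.sorted new_tokens tokBegin false).filter
        (fun n => !(existing_tokens.any (fun e2 => pvOverlapB e2 n)))
    PySem.List.sorted (kept ++ existing_sorted) tokBegin false

-- ===== PRECONDITION & SPEC =====
-- Pre_ excludes (when existing_tokens is nonempty) tokens lacking a 'begin'/'end'
-- key — a KeyError in both programs on most control paths, an accidental return on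
-- the rest — and degenerate tokens with end ≤ begin, on which A's interleaving of
-- equal-position tokens is an accidental tie order of its pointer sweep.
def Pre_merge_with_existing_tokens_py (new_tokens : List (List (String × Int))) (existing_tokens : List (List (String × Int))) : Prop :=
  existing_tokens = [] ∨
    ∀ t ∈ new_tokens ++ existing_tokens,
      ("begin" ∈ t.map Prod.fst ∧ "end" ∈ t.map Prod.fst) ∧ tokBegin t < tokEnd t
instance (new_tokens : List (List (String × Int))) (existing_tokens : List (List (String × Int))) : Decidable (Pre_merge_with_existing_tokens_py new_tokens existing_tokens) := by unfold Pre_merge_with_existing_tokens_py; infer_instance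
def pvWitness_merge_with_existing_tokens_py : (List (List (String × Int))) × (List (List (String × Int))) :=
  ([[("begin", 0), ("end", 1)]], [[("begin", 2), ("end", 3)]])

def Spec_merge_with_existing_tokens_py (new_tokens : List (List (String × Int))) (existing_tokens : List (List (String × Int))) (out : List (List (String × Int))) : Prop := out = merge_with_existing_tokens_py_alt new_tokens existing_tokens
instance (new_tokens : List (List (String × Int))) (existing_tokens : List (List (String × Int))) (out : List (List (String × Int))) : Decidable (Spec_merge_with_existing_tokens_py new_tokens existing_tokens out) := by unfold Spec_merge_with_existing_tokens_py; infer_instance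

-- ===== CLAIM (what is proved, stated in full; the proofs are below) =====
def Claim_equal_merge_with_existing_tokens_py : Prop := ∀ (new_tokens : List (List (String × Int))) (existing_tokens : List (List (String × Int))), Dom_merge_with_existing_tokens_py new_tokens existing_tokens → Pre_merge_with_existing_tokens_py new_tokens existing_tokens → Spec_merge_with_existing_tokens_py new_tokens existing_tokens (merge_with_existing_tokens_py new_tokens existing_tokens)

-- ===== LEMMAS AND PROOFS =====

-- proof-only helper: the stable two-list merge by 'begin' (left list wins ties)
def pvMergeT : List (List (String × Int)) → List (List (String × Int)) →
    List (List (String × Int))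
  | xs, [] => xs
  | [], ys => ys
  | x :: xs, y :: ys =>
    if tokBegin y < tokBegin x then y :: pvMergeT (x :: xs) ys
    else x :: pvMergeT xs (y :: ys)
  termination_by xs ys => xs.length + ys.length

theorem pvMergeT_nil_right (xs : List (List (String × Int))) : pvMergeT xs [] = xs := by
  cases xs <;> simp [pvMergeT]

theorem pvMergeT_nil_left (ys : List (List (String × Int))) : pvMergeT [] ys = ys := by
  cases ys <;> simp [pvMergeT]

-- a block of existing tokens strictly before every remaining left token is emitted first
theorem pvMergeT_right_prefix (A ys xs : List (List (String × Int)))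
    (h : ∀ e ∈ A, ∀ x ∈ xs, tokBegin e < tokBegin x) :
    pvMergeT xs (A ++ ys) = A ++ pvMergeT xs ys := by
  induction A with
  | nil => simp
  | cons e A ih =>
    cases xs with
    | nil => simp [pvMergeT_nil_left]
    | cons x xs =>
      have he : tokBegin e < tokBegin x := h e (by simp) x (by simp)
      simp only [List.cons_append]
      rw [pvMergeT, if_pos he, ih (fun a ha b hb => h a (by simp [ha]) b hb)]

-- a block of left tokens never preceded by any right token is emitted first
theorem pvMergeT_left_prefix (A xs ys : List (List (String × Int)))
    (h : ∀ a ∈ A, ∀ y ∈ ys, ¬ tokBegin y < tokBegin a) :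
    pvMergeT (A ++ xs) ys = A ++ pvMergeT xs ys := by
  induction A with
  | nil => simp
  | cons a A ih =>
    cases ys with
    | nil => simp [pvMergeT_nil_right]
    | cons y ys =>
      have ha : ¬ tokBegin y < tokBegin a := h a (by simp) y (by simp)
      simp only [List.cons_append]
      rw [pvMergeT, if_neg ha, ih (fun b hb c hc => h b (by simp [hb]) c hc)]

theorem pvMergeT_cons_right_split (l : List (List (String × Int)))
    (e : List (String × Int)) (ys : List (List (String × Int))) :
    pvMergeT l (e :: ys) =
      l.takeWhile (fun x => !decide (tokBegin e < tokBegin x)) ++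
        e :: pvMergeT (l.dropWhile (fun x => !decide (tokBegin e < tokBegin x))) ys := by
  induction l with
  | nil => simp [pvMergeT_nil_left]
  | cons x l ih =>
    by_cases h : tokBegin e < tokBegin x
    · rw [pvMergeT, if_pos h]
      simp [h]
    · rw [pvMergeT, if_neg h]
      simp only [List.takeWhile_cons, List.dropWhile_cons, h]
      simp [ih]

-- Python's insertion of one element IS a one-element merge
theorem pvInsertBy_eq_mergeT (e : List (String × Int)) (l : List (List (String × Int))) :
    PySem.List.insertBy (fun a b => decide (tokBegin a < tokBegin b)) e l =
      pvMergeT l [e] := by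
  induction l with
  | nil => simp [PySem.List.insertBy, pvMergeT]
  | cons x l ih =>
    by_cases h : tokBegin e < tokBegin x
    · rw [pvMergeT, if_pos h, pvMergeT_nil_right]
      simp [PySem.List.insertBy, h]
    · rw [pvMergeT, if_neg h]
      simp [PySem.List.insertBy, h, ih]

-- folding Python's insertion of a begin-sorted list is the stable merge
theorem pvFoldlInsert (es : List (List (String × Int)))
    (l1 : List (List (String × Int)))
    (h2 : es.Pairwise (fun a b => tokBegin a ≤ tokBegin b)) :
    es.foldl (fun acc x =>
        PySem.List.insertBy (fun a b => decide (tokBegin a < tokBegin b)) x acc) l1 =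
      pvMergeT l1 es := by
  induction es generalizing l1 with
  | nil => simp [pvMergeT_nil_right]
  | cons e es ih =>
    rw [List.foldl_cons, ih _ h2.tail, pvInsertBy_eq_mergeT]
    set p : List (String × Int) → Bool := fun x => !decide (tokBegin e < tokBegin x)
      with hp
    have hsplit : pvMergeT l1 [e] =
        l1.takeWhile p ++ e :: l1.dropWhile p := by
      rw [pvMergeT_cons_right_split l1 e [], pvMergeT_nil_right]
    rw [hsplit]
    have hA : ∀ a ∈ l1.takeWhile p, ∀ y ∈ es, ¬ tokBegin y < tokBegin a := by
      intro a ha y hy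
      have h1 : p a = true := List.mem_takeWhile_imp ha
      have h2' : tokBegin e ≤ tokBegin y := List.rel_of_pairwise_cons h2 hy
      simp only [hp, Bool.not_eq_true', decide_eq_false_iff_not, not_lt] at h1
      omega
    have hEB : pvMergeT (e :: l1.dropWhile p) es = e :: pvMergeT (l1.dropWhile p) es := by
      have := pvMergeT_left_prefix [e] (l1.dropWhile p) es
        (fun a ha y hy => by
          rcases List.mem_singleton.mp ha with rfl
          have := List.rel_of_pairwise_cons h2 hy
          omega)
      simpa using this
    calc pvMergeT (l1.takeWhile p ++ e :: l1.dropWhile p) es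
        = l1.takeWhile p ++ pvMergeT (e :: l1.dropWhile p) es :=
          pvMergeT_left_prefix _ _ _ hA
      _ = l1.takeWhile p ++ e :: pvMergeT (l1.dropWhile p) es := by rw [hEB]
      _ = pvMergeT l1 (e :: es) := (pvMergeT_cons_right_split l1 e es).symm

-- Python's stable sort of two begin-sorted blocks is the stable merge
theorem pvSortedAppend (l1 l2 : List (List (String × Int)))
    (h1 : l1.Pairwise (fun a b => tokBegin a ≤ tokBegin b))
    (h2 : l2.Pairwise (fun a b => tokBegin a ≤ tokBegin b)) :
    PySem.List.sorted (l1 ++ l2) tokBegin false = pvMergeT l1 l2 := by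
  rw [PySem.List.sorted_eq_foldl_insertBy, List.foldl_append,
    ← PySem.List.sorted_eq_foldl_insertBy,
    PySem.List.sorted_eq_self_of_pairwise _ _ h1, pvFoldlInsert l2 l1 h2]

-- A-side loop lemmas ---------------------------------------------------------

theorem pvSkipA_eq (nb : Int) (m r : List (List (String × Int))) :
    pvSkipA nb m r = (m ++ r.takeWhile (fun e => decide (tokEnd e ≤ nb)),
      r.dropWhile (fun e => decide (tokEnd e ≤ nb))) := by
  induction r generalizing m with
  | nil => simp [pvSkipA]
  | cons e r ih =>
    by_cases h : tokEnd e ≤ nb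
    · simp [pvSkipA, h, ih]
    · simp [pvSkipA, h]

theorem pvDropWhile_head {α : Type} (p : α → Bool) (l t : List α) (e : α)
    (h : l.dropWhile p = e :: t) : p e = false := by
  induction l with
  | nil => simp at h
  | cons x xs ih =>
    rw [List.dropWhile_cons] at h
    by_cases hp : p x
    · exact ih (by simpa [hp] using h)
    · rw [if_neg (by simp [hp])] at h
      cases h
      simpa using hp

-- the step of A's outer loop, in takeWhile/dropWhile form
theorem pvStepA_eq (acc rem : List (List (String × Int))) (n : List (String × Int)) :
    pvStepA (acc, rem) n =
      (if rem.dropWhile (fun e => decide (tokEnd e ≤ tokBegin n)) ≠ [] ∧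
          tokBegin ((rem.dropWhile (fun e => decide (tokEnd e ≤ tokBegin n))).headD []) <
            tokEnd n then
        (acc ++ rem.takeWhile (fun e => decide (tokEnd e ≤ tokBegin n)),
          rem.dropWhile (fun e => decide (tokEnd e ≤ tokBegin n)))
       else
        (acc ++ rem.takeWhile (fun e => decide (tokEnd e ≤ tokBegin n)) ++ [n],
          rem.dropWhile (fun e => decide (tokEnd e ≤ tokBegin n)))) := by
  rw [pvStepA]
  simp only [pvSkipA_eq]
  cases hd : rem.dropWhile (fun e => decide (tokEnd e ≤ tokBegin n)) with
  | nil => simp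
  | cons e dt =>
    by_cases hov : tokBegin e < tokEnd n
    · simp [hov]
    · simp [hov]

-- the central invariant: A's sweep computes the stable merge of the kept new
-- tokens with the remaining existing tokens (dichotomy: a kept new token is
-- strictly after or strictly before each existing token, never tied)
theorem pvMainA (kp : List (String × Int) → Bool)
    (ns : List (List (String × Int)))
    (rem acc : List (List (String × Int)))
    (hrem : rem.Pairwise (fun a b => tokBegin a ≤ tokBegin b))
    (hns : ns.Pairwise (fun a b => tokBegin a ≤ tokBegin b))
    (hkp : ∀ n ∈ ns, kp n = !(rem.any (fun e2 => pvOverlapB e2 n)))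
    (hdich : ∀ n ∈ ns, kp n = true → ∀ e ∈ rem,
      (tokEnd e ≤ tokBegin n ∧ tokBegin e < tokBegin n) ∨
      (tokBegin n < tokBegin e ∧ tokBegin n < tokEnd e)) :
    ((ns.foldl pvStepA (acc, rem)).2).foldl (fun m e => m ++ [e])
        ((ns.foldl pvStepA (acc, rem)).1) =
      acc ++ pvMergeT (ns.filter kp) rem := by
  induction ns generalizing rem acc with
  | nil =>
    simp only [List.foldl_nil, List.filter_nil, pvMergeT_nil_left]
    exact PySem.List.foldl_append_singleton_eq_self rem acc
  | cons n ns ih =>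
    set tk := rem.takeWhile (fun e => decide (tokEnd e ≤ tokBegin n)) with htkdef
    set dr := rem.dropWhile (fun e => decide (tokEnd e ≤ tokBegin n)) with hdrdef
    have hsplit : tk ++ dr = rem := List.takeWhile_append_dropWhile
    have htkle : ∀ x ∈ tk, tokEnd x ≤ tokBegin n := by
      intro x hx
      simpa using List.mem_takeWhile_imp hx
    have hdr_pw : dr.Pairwise (fun a b => tokBegin a ≤ tokBegin b) :=
      List.Pairwise.sublist (List.dropWhile_sublist _) hrem
    have hns_ge : ∀ n' ∈ ns, tokBegin n ≤ tokBegin n' := fun n' h =>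
      List.rel_of_pairwise_cons hns h
    have hkp' : ∀ n' ∈ ns, kp n' = !(dr.any (fun e2 => pvOverlapB e2 n')) := by
      intro n' hn'
      have h := hkp n' (by simp [hn'])
      rw [← hsplit, List.any_append] at h
      have htkany : tk.any (fun e2 => pvOverlapB e2 n') = false := by
        rw [List.any_eq_false]
        intro e he
        have h1 := htkle e he
        have h2 := hns_ge n' hn'
        simp only [pvOverlapB, Bool.and_eq_true, decide_eq_true_eq, not_and, gt_iff_lt]
        intro _
        omega
      rw [htkany] at h
      simpa using h
    have hdich' : ∀ n' ∈ ns, kp n' = true → ∀ e ∈ dr,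
        (tokEnd e ≤ tokBegin n' ∧ tokBegin e < tokBegin n') ∨
        (tokBegin n' < tokBegin e ∧ tokBegin n' < tokEnd e) := by
      intro n' hn' hk e he
      exact hdich n' (by simp [hn']) hk e (by rw [← hsplit]; simp [he])
    -- every token of tk is strictly before every kept new token (n or later)
    have htk_before : ∀ e ∈ tk, ∀ x ∈ (n :: ns).filter kp, tokBegin e < tokBegin x := by
      intro e he x hx
      have hxm := List.mem_of_mem_filter hx
      have hxk : kp x = true := List.of_mem_filter hx
      have hd := hdich x hxm hxk e (by rw [← hsplit]; simp [he])
      have h1 := htkle e he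
      have h2 : tokBegin n ≤ tokBegin x := by
        rcases List.mem_cons.mp hxm with rfl | hxm'
        · omega
        · exact hns_ge x hxm'
      rcases hd with ⟨_, h⟩ | ⟨h3, h4⟩
      · exact h
      · omega
    have hstep : pvStepA (acc, rem) n =
        (if dr ≠ [] ∧ tokBegin (dr.headD []) < tokEnd n then (acc ++ tk, dr)
         else (acc ++ tk ++ [n], dr)) := by
      rw [pvStepA_eq, ← htkdef, ← hdrdef]
    cases hd : dr with
    | nil =>
      -- every remaining existing token ends before n begins: n is kept
      have hkpn : kp n = true := by
        rw [hkp n (by simp), ← hsplit, hd, List.append_nil]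
        have : tk.any (fun e2 => pvOverlapB e2 n) = false := by
          rw [List.any_eq_false]
          intro e he
          have h1 := htkle e he
          simp only [pvOverlapB, Bool.and_eq_true, decide_eq_true_eq, not_and, gt_iff_lt]
          intro _; omega
        rw [this]; rfl
      rw [List.foldl_cons, hstep, hd]
      simp only [ne_eq, not_true_eq_false, false_and, if_false]
      rw [hd] at hkp' hdich'
      rw [ih [] (acc ++ tk ++ [n]) (by simp) hns.tail hkp' hdich']
      rw [List.filter_cons_of_pos hkpn]
      have hrem_tk : rem = tk := by rw [← hsplit, hd, List.append_nil]
      rw [hrem_tk]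
      rw [show tk = tk ++ ([] : List (List (String × Int))) by simp,
        pvMergeT_right_prefix tk [] _ (by
          intro e he x hx
          exact htk_before e he x (by rw [List.filter_cons_of_pos hkpn]; exact hx))]
      simp [pvMergeT_nil_right]
    | cons estar dt =>
      have hestar : ¬ tokEnd estar ≤ tokBegin n := by
        have h0 := pvDropWhile_head (fun e => decide (tokEnd e ≤ tokBegin n)) rem dt estar
          (by rw [← hdrdef]; exact hd)
        simpa using h0
      rw [hd] at hkp' hdich' hdr_pw
      by_cases hov : tokBegin estar < tokEnd n
      · -- n overlaps the first not-yet-emitted existing token: n is dropped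
        have hkpn : kp n = false := by
          rw [hkp n (by simp), ← hsplit, hd]
          have : ((tk ++ estar :: dt).any fun e2 => pvOverlapB e2 n) = true := by
            rw [List.any_eq_true]
            refine ⟨estar, by simp, ?_⟩
            simp only [pvOverlapB, Bool.and_eq_true, decide_eq_true_eq, gt_iff_lt]
            omega
          rw [this]; rfl
        rw [List.foldl_cons, hstep, hd]
        simp only [ne_eq, reduceCtorEq, not_false_eq_true, List.headD_cons, true_and, hov,
          if_true]
        rw [ih (estar :: dt) (acc ++ tk) hdr_pw hns.tail hkp' hdich']
        rw [List.filter_cons_of_neg (by simp [hkpn])]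
        rw [← hsplit, hd]
        rw [pvMergeT_right_prefix tk (estar :: dt) _ (by
          intro e he x hx
          exact htk_before e he x (by rw [List.filter_cons_of_neg (by simp [hkpn])]; exact hx))]
        simp
      · -- no overlap anywhere: n is kept and emitted before estar
        have hkpn : kp n = true := by
          rw [hkp n (by simp), ← hsplit, hd]
          have : ((tk ++ estar :: dt).any fun e2 => pvOverlapB e2 n) = false := by
            rw [List.any_eq_false]
            intro e he
            simp only [pvOverlapB, Bool.and_eq_true, decide_eq_true_eq, not_and, gt_iff_lt]
            rcases List.mem_append.mp he with he | he
            · have := htkle e he; intro _; omega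
            · rcases List.mem_cons.mp he with rfl | he
              · intro h1; omega
              · have h2 := List.rel_of_pairwise_cons hdr_pw he
                intro h1; omega
          rw [this]; rfl
        rw [List.foldl_cons, hstep, hd]
        simp only [ne_eq, reduceCtorEq, not_false_eq_true, List.headD_cons, true_and, hov,
          if_false]
        rw [ih (estar :: dt) (acc ++ tk ++ [n]) hdr_pw hns.tail hkp' hdich']
        rw [List.filter_cons_of_pos hkpn]
        rw [← hsplit, hd]
        rw [pvMergeT_right_prefix tk (estar :: dt) _ (by
          intro e he x hx
          exact htk_before e he x (by rw [List.filter_cons_of_pos hkpn]; exact hx))]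
        have hnb : tokBegin n < tokBegin estar := by
          have hdd := hdich n (by simp) hkpn estar (by rw [← hsplit, hd]; simp)
          rcases hdd with ⟨h1, _⟩ | ⟨h1, _⟩
          · omega
          · exact h1
        rw [pvMergeT, if_neg (by omega)]
        simp

theorem pvAny_perm (l1 l2 : List (List (String × Int))) (h : l1.Perm l2)
    (f : List (String × Int) → Bool) : l1.any f = l2.any f :=
  List.Perm.any_eq h

-- ===== VERDICT (by name: the statement is the Claim_ definition above) =====
theorem merge_with_existing_tokens_py_spec : Claim_equal_merge_with_existing_tokens_py := by
  intro new_tokens existing_tokens _ hpre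
  unfold Spec_merge_with_existing_tokens_py
  unfold merge_with_existing_tokens_py merge_with_existing_tokens_py_alt
  by_cases hemp : existing_tokens.isEmpty
  · simp [hemp]
  · simp only [hemp, Bool.false_eq_true, if_false]
    have hprop : ∀ t ∈ new_tokens ++ existing_tokens, tokBegin t < tokEnd t := by
      rcases hpre with h | h
      · exact absurd (by simp [h] : existing_tokens.isEmpty = true) hemp
      · exact fun t ht => (h t ht).2
    set es := PySem.List.sorted existing_tokens tokBegin false with hes
    set ns := PySem.List.sorted new_tokens tokBegin false with hns
    set kp : List (String × Int) → Bool :=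
      fun t => !(existing_tokens.any (fun e2 => pvOverlapB e2 t)) with hkpdef
    have hes_perm : es.Perm existing_tokens :=
      PySem.List.sorted_perm existing_tokens tokBegin false
    have hkp : ∀ n ∈ ns, kp n = !(es.any (fun e2 => pvOverlapB e2 n)) := by
      intro n _
      show (!existing_tokens.any fun e2 => pvOverlapB e2 n) = _
      rw [pvAny_perm existing_tokens es hes_perm.symm]
    have hdich : ∀ n ∈ ns, kp n = true → ∀ e ∈ es,
        (tokEnd e ≤ tokBegin n ∧ tokBegin e < tokBegin n) ∨
        (tokBegin n < tokBegin e ∧ tokBegin n < tokEnd e) := by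
      intro n hn hk e he
      have hnm : n ∈ new_tokens := (PySem.List.mem_sorted _ _ _ _).mp hn
      have hem : e ∈ existing_tokens := (PySem.List.mem_sorted _ _ _ _).mp he
      have hpn : tokBegin n < tokEnd n := hprop n (by simp [hnm])
      have hpe : tokBegin e < tokEnd e := hprop e (by simp [hem])
      have hno : pvOverlapB e n = false := by
        rw [hkpdef] at hk
        simp only [Bool.not_eq_true'] at hk
        simpa using List.any_eq_false.mp hk e hem
      simp only [pvOverlapB, Bool.and_eq_false_iff, decide_eq_false_iff_not, not_lt,
        gt_iff_lt] at hno
      rcases hno with h | h <;> omega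
    have hA := pvMainA kp ns es []
      (PySem.List.sorted_pairwise existing_tokens tokBegin)
      (PySem.List.sorted_pairwise new_tokens tokBegin)
      hkp hdich
    simp only [List.nil_append] at hA
    rw [hA]
    rw [pvSortedAppend (ns.filter kp) es
      (List.Pairwise.filter _ (PySem.List.sorted_pairwise new_tokens tokBegin))
      (PySem.List.sorted_pairwise existing_tokens tokBegin)]
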